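-- pv_equiv track=rewrite | github.com/thebargaintenor/paladin-pathways | src/pathways_plugin.py | extract_compounds
-- ===== SOURCE A (Python) =====
-- def extract_compounds(data):
--     '''
--     build a dictionary of compound IDs and names from KEGG pathway DAT file
--     '''
--     compounds = {}
--     in_compound_section = False
--     for line in data.split('\n'):
--         section = line[:12].rstrip()
--         if section == "COMPOUND":
--             in_compound_section = True
--         elif section and section != "COMPOUND":
--             in_compound_section = False
--
--         # extract compound information from record
--         if in_compound_section and line:
--             cid = line[12:20].rstrip()
--             cname = line[20:].rstrip()
--             compounds[cid] = cname
--
--     return compounds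
-- ===== SOURCE B (Python) =====
-- def extract_compounds(data):
--     '''
--     build a dictionary of compound IDs and names from KEGG pathway DAT file
--     '''
--     # pass 1: group lines into labelled section blocks
--     blocks = []
--     label, block = "", []
--     for line in data.split('\n'):
--         lab = line[:12].rstrip()
--         if lab:
--             blocks.append((label, block))
--             label, block = lab, []
--         block.append(line)
--     blocks.append((label, block))
--     # pass 2: record every non-empty line of each COMPOUND block
--     compounds = {}
--     for lab, blk in blocks:
--         if lab == "COMPOUND":
--             for line in blk:
--                 if line:
--                     compounds[line[12:20].rstrip()] = line[20:].rstrip()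
--     return compounds
-- ===== Notes on version B (the rewrite author's own statement) =====
-- stated objective: simpler
-- what changed: Replaces A's single interleaved loop with a stateful in-section flag by a two-pass decomposition: first group the lines into labelled section blocks, then record the lines of the COMPOUND blocks into the dict.
import Mathlib
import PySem

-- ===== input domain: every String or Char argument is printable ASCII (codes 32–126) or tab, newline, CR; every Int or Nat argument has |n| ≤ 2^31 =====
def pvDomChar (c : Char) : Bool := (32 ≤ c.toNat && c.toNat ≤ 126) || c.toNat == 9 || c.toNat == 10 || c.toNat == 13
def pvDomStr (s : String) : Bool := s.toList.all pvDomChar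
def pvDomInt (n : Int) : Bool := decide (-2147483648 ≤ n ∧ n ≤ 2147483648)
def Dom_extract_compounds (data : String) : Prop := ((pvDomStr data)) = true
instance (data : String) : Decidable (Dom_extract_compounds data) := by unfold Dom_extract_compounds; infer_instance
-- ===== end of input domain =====

-- B replaces A's single interleaved loop-with-flag by a two-pass decomposition
-- (group lines into labelled section blocks, then record the COMPOUND blocks);
-- objective: simpler/clearer structure, same cost.

-- ===== PORT A =====
-- one fold step = one iteration of A's loop; state = (compounds, in_compound_section)
def pvStepA (st : PySem.Dict String String × Bool) (line : String) :
    PySem.Dict String String × Bool :=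
  let sect := PySem.Str.rstrip (PySem.Str.slice line none (some 12))
  let flag := if sect = "COMPOUND" then true else if sect ≠ "" then false else st.2
  if flag ∧ line ≠ "" then
    (st.1.insert (PySem.Str.rstrip (PySem.Str.slice line (some 12) (some 20)))
                 (PySem.Str.rstrip (PySem.Str.slice line (some 20) none)), flag)
  else
    (st.1, flag)

-- data.split('\n'): "\n" ≠ "" so Str.split? always returns some; getD [] only discharges the option
def extract_compounds (data : String) : List (String × String) :=
  ((((PySem.Str.split? data "\n").getD []).foldl pvStepA (PySem.Dict.empty, false)).1).items

-- ===== PORT B =====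
-- label of a line: line[:12].rstrip()
def pvLabelOf (line : String) : String :=
  PySem.Str.rstrip (PySem.Str.slice line none (some 12))

-- pass-1 step: state = (label, block, blocks); a nonblank label flushes the pending block
def pvGStep (st : String × List String × List (String × List String)) (line : String) :
    String × List String × List (String × List String) :=
  let lab := pvLabelOf line
  if lab ≠ "" then (lab, [line], st.2.2 ++ [(st.1, st.2.1)])
  else (st.1, st.2.1 ++ [line], st.2.2)

-- pass-2 inner step: record one non-empty line of a COMPOUND block
def pvRecordLine (d : PySem.Dict String String) (line : String) : PySem.Dict String String :=
  if line ≠ "" then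
    d.insert (PySem.Str.rstrip (PySem.Str.slice line (some 12) (some 20)))
             (PySem.Str.rstrip (PySem.Str.slice line (some 20) none))
  else d

-- pass-2 outer step: process one block
def pvProcBlock (d : PySem.Dict String String) (b : String × List String) :
    PySem.Dict String String :=
  if b.1 = "COMPOUND" then b.2.foldl pvRecordLine d else d

def extract_compounds_alt (data : String) : List (String × String) :=
  let st := ((PySem.Str.split? data "\n").getD []).foldl pvGStep ("", [], [])
  ((st.2.2 ++ [(st.1, st.2.1)]).foldl pvProcBlock PySem.Dict.empty).items

-- ===== PRECONDITION & SPEC =====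
def Spec_extract_compounds (data : String) (out : List (String × String)) : Prop := out = extract_compounds_alt data
instance (data : String) (out : List (String × String)) : Decidable (Spec_extract_compounds data out) := by unfold Spec_extract_compounds; infer_instance

-- ===== CLAIM (what is proved, stated in full; the proofs are below) =====
def Claim_equal_extract_compounds : Prop := ∀ (data : String), Dom_extract_compounds data → Spec_extract_compounds data (extract_compounds data)

-- ===== LEMMAS AND PROOFS =====

-- pvStepA, with its section expression folded back into pvLabelOf
theorem pvStepA_def (st : PySem.Dict String String × Bool) (l : String) :
    pvStepA st l =
      (if (if pvLabelOf l = "COMPOUND" then true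
           else if pvLabelOf l ≠ "" then false else st.2) ∧ l ≠ "" then
        (st.1.insert (PySem.Str.rstrip (PySem.Str.slice l (some 12) (some 20)))
                     (PySem.Str.rstrip (PySem.Str.slice l (some 20) none)),
         if pvLabelOf l = "COMPOUND" then true
         else if pvLabelOf l ≠ "" then false else st.2)
      else
        (st.1,
         if pvLabelOf l = "COMPOUND" then true
         else if pvLabelOf l ≠ "" then false else st.2)) := rfl

-- accumulator-free form of pass 1
def pvGroup : List String → String → List String → List (String × List String)
  | [], label, block => [(label, block)]
  | l :: ls, label, block =>
      if pvLabelOf l ≠ "" then (label, block) :: pvGroup ls (pvLabelOf l) [l]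
      else pvGroup ls label (block ++ [l])

theorem pvGroup_fold (lines : List String) :
    ∀ (label : String) (block : List String) (blocks : List (String × List String)),
    (lines.foldl pvGStep (label, block, blocks)).2.2
      ++ [((lines.foldl pvGStep (label, block, blocks)).1,
           (lines.foldl pvGStep (label, block, blocks)).2.1)]
      = blocks ++ pvGroup lines label block := by
  induction lines with
  | nil => intro label block blocks; simp [pvGroup]
  | cons l ls ih =>
      intro label block blocks
      simp only [List.foldl_cons, pvGStep, pvGroup]
      by_cases h : pvLabelOf l ≠ ""
      · simp [h, ih]
      · simp [h, ih]

theorem pvLine_ne_of_label_ne (l : String) (h : pvLabelOf l ≠ "") : l ≠ "" := by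
  intro he; apply h; subst he; decide

theorem pvLabelOf_empty : pvLabelOf "" = "" := by decide

theorem pvStepA_group_start (D : PySem.Dict String String) (label l : String)
    (h : pvLabelOf l ≠ "") (hl : l ≠ "") :
    pvStepA (D, decide (label = "COMPOUND")) l
      = (pvProcBlock D (pvLabelOf l, [l]), decide (pvLabelOf l = "COMPOUND")) := by
  rw [pvStepA_def]
  by_cases hc : pvLabelOf l = "COMPOUND" <;> simp [pvProcBlock, pvRecordLine, h, hc, hl]

theorem pvStepA_group_cont (d : PySem.Dict String String) (label l : String)
    (block : List String) (h : pvLabelOf l = "") :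
    pvStepA (pvProcBlock d (label, block), decide (label = "COMPOUND")) l
      = (pvProcBlock d (label, block ++ [l]), decide (label = "COMPOUND")) := by
  rw [pvStepA_def]
  by_cases hc : label = "COMPOUND" <;> by_cases he : l = "" <;>
    simp [pvProcBlock, pvRecordLine, pvLabelOf_empty, h, hc, he, List.foldl_append]

-- A's fold over the lines computes pass 2 over the grouped blocks
theorem pvMain (lines : List String) :
    ∀ (label : String) (block : List String) (d : PySem.Dict String String),
    (pvGroup lines label block).foldl pvProcBlock d
      = (lines.foldl pvStepA (pvProcBlock d (label, block), decide (label = "COMPOUND"))).1 := by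
  induction lines with
  | nil => intro label block d; simp [pvGroup]
  | cons l ls ih =>
      intro label block d
      simp only [pvGroup, List.foldl_cons]
      by_cases h : pvLabelOf l ≠ ""
      · rw [if_pos h, List.foldl_cons, ih,
            pvStepA_group_start _ _ _ h (pvLine_ne_of_label_ne l h)]
      · simp only [ne_eq, not_not] at h
        rw [if_neg (by simp [h]), ih, pvStepA_group_cont _ _ _ _ h]

-- ===== VERDICT (by name: the statement is the Claim_ definition above) =====
theorem extract_compounds_spec : Claim_equal_extract_compounds := by
  intro data _
  simp only [Spec_extract_compounds, extract_compounds, extract_compounds_alt]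
  rw [pvGroup_fold]
  rw [List.nil_append, pvMain]
  simp [pvProcBlock]
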